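-- pv_equiv track=rewrite | github.com/rjspencer1989/phd_code | process_config/perform_undo.py | get_rev_list
-- ===== SOURCE A (Python) =====
-- def get_rev_list(doc, undo_rev):
--     revs_info = doc['_revs_info']
--     rev_list = []
--     for item in revs_info:
--         rev_list.append(str(item['rev']))
--     current_index = rev_list.index(undo_rev)
--     revs_list = rev_list[current_index + 1:]
--     return revs_list
-- ===== SOURCE B (Python) =====
-- def get_rev_list(doc, undo_rev):
--     # single gated pass: skip until undo_rev is seen, then collect the rest
--     found = False
--     result = []
--     for item in doc['_revs_info']:
--         s = str(item['rev'])
--         if found: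
--             result.append(s)
--         elif s == undo_rev:
--             found = True
--     if not found:
--         raise ValueError('%r is not in list' % undo_rev)
--     return result
-- ===== Notes on version B (the rewrite author's own statement) =====
-- stated objective: simpler
-- what changed: Replaces A's build-full-list / .index / slice pipeline with one gated pass that starts collecting after the matching rev is seen.
import Mathlib
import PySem

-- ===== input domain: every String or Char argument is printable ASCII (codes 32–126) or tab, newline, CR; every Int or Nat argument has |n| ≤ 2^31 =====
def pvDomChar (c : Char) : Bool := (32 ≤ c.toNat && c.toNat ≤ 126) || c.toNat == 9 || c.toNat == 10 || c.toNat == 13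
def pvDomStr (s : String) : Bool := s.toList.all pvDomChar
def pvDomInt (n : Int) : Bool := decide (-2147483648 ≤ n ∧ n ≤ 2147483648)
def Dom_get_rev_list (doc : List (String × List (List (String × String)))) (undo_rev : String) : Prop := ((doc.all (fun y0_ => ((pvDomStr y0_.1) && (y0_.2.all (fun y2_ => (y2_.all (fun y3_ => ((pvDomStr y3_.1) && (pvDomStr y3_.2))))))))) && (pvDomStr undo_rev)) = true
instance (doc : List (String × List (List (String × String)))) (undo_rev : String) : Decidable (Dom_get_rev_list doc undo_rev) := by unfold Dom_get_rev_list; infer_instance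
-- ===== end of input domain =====

-- B replaces A's build-list / .index / slice pipeline with one gated pass (simpler decomposition, same cost).

-- ===== PORT A =====
def get_rev_list (doc : List (String × List (List (String × String)))) (undo_rev : String) : List String :=
  let revs_info := ((PySem.Dict.mk doc).get? "_revs_info").getD []  -- none = KeyError, excluded by Pre_
  let rev_list := revs_info.foldl (fun acc item => acc ++ [((PySem.Dict.mk item).get? "rev").getD ""]) []
    -- getD "": 'rev' missing = KeyError, excluded by Pre_; str of a str is the str itself
  match PySem.List.index? rev_list undo_rev with
  | some current_index => PySem.List.slice rev_list (some ((current_index : Int) + 1)) none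
  | none => []  -- ValueError from .index, excluded by Pre_

-- ===== PORT B =====
def altGo (undo_rev : String) (items : List (List (String × String))) (found : Bool) (result : List String) : Bool × List String :=
  match items with
  | [] => (found, result)
  | item :: rest =>
    let s := ((PySem.Dict.mk item).get? "rev").getD ""  -- 'rev' missing = KeyError, excluded by Pre_
    if found then altGo undo_rev rest true (result ++ [s])
    else if s == undo_rev then altGo undo_rev rest true result
    else altGo undo_rev rest found result

def get_rev_list_alt (doc : List (String × List (List (String × String)))) (undo_rev : String) : List String :=
  let revs_info := ((PySem.Dict.mk doc).get? "_revs_info").getD []  -- none = KeyError, excluded by Pre_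
  let fr := altGo undo_rev revs_info false []
  if fr.1 then fr.2 else []  -- found = false: Python B raises ValueError, excluded by Pre_

-- ===== PRECONDITION & SPEC =====
-- Pre_ excludes exactly the inputs where A raises: a missing '_revs_info' key (KeyError),
-- an item without a 'rev' key (KeyError), and undo_rev absent from the rev list (ValueError).
def Pre_get_rev_list (doc : List (String × List (List (String × String)))) (undo_rev : String) : Prop :=
  ((PySem.Dict.mk doc).get? "_revs_info").isSome = true ∧
  (∀ item ∈ ((PySem.Dict.mk doc).get? "_revs_info").getD [], ((PySem.Dict.mk item).get? "rev").isSome = true) ∧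
  undo_rev ∈ (((PySem.Dict.mk doc).get? "_revs_info").getD []).map (fun item => ((PySem.Dict.mk item).get? "rev").getD "")
instance (doc : List (String × List (List (String × String)))) (undo_rev : String) : Decidable (Pre_get_rev_list doc undo_rev) := by unfold Pre_get_rev_list; infer_instance

def pvWitness_get_rev_list : (List (String × List (List (String × String)))) × String :=
  ([("_revs_info", [[("rev", "2-b")], [("rev", "1-a")]])], "2-b")

def Spec_get_rev_list (doc : List (String × List (List (String × String)))) (undo_rev : String) (out : List String) : Prop := out = get_rev_list_alt doc undo_rev
instance (doc : List (String × List (List (String × String)))) (undo_rev : String) (out : List String) : Decidable (Spec_get_rev_list doc undo_rev out) := by unfold Spec_get_rev_list; infer_instance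

-- ===== CLAIM (what is proved, stated in full; the proofs are below) =====
def Claim_equal_get_rev_list : Prop := ∀ (doc : List (String × List (List (String × String)))) (undo_rev : String), Dom_get_rev_list doc undo_rev → Pre_get_rev_list doc undo_rev → Spec_get_rev_list doc undo_rev (get_rev_list doc undo_rev)

-- ===== LEMMAS AND PROOFS =====

lemma foldl_app_eq_map (f : List (String × String) → String) :
    ∀ (l : List (List (String × String))) (acc : List String),
      l.foldl (fun acc item => acc ++ [f item]) acc = acc ++ l.map f := by
  intro l
  induction l with
  | nil => simp
  | cons x xs ih => intro acc; simp [List.foldl, ih]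

lemma altGo_true (u : String) :
    ∀ (items : List (List (String × String))) (acc : List String),
      altGo u items true acc = (true, acc ++ items.map (fun item => ((PySem.Dict.mk item).get? "rev").getD "")) := by
  intro items
  induction items with
  | nil => simp [altGo]
  | cons x xs ih => intro acc; simp [altGo, ih]

lemma altGo_main (u : String) :
    ∀ (items : List (List (String × String))),
      u ∈ items.map (fun item => ((PySem.Dict.mk item).get? "rev").getD "") →
      ∃ i, PySem.List.index? (items.map (fun item => ((PySem.Dict.mk item).get? "rev").getD "")) u = some i ∧
        altGo u items false [] = (true, (items.map (fun item => ((PySem.Dict.mk item).get? "rev").getD "")).drop (i + 1)) := by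
  intro items
  induction items with
  | nil => simp
  | cons x xs ih =>
    intro hmem
    by_cases hx : ((PySem.Dict.mk x).get? "rev").getD "" = u
    · refine ⟨0, ?_, ?_⟩
      · rw [List.map_cons, hx, PySem.List.index?_cons_self]
      · simp [altGo, hx, altGo_true]
    · have hmem' : u ∈ xs.map (fun item => ((PySem.Dict.mk item).get? "rev").getD "") := by
        rw [List.map_cons] at hmem
        rcases List.mem_cons.mp hmem with h | h
        · exact absurd h.symm hx
        · exact h
      obtain ⟨i, hi, hgo⟩ := ih hmem'
      refine ⟨i + 1, ?_, ?_⟩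
      · rw [List.map_cons, PySem.List.index?_cons_of_ne _ hx, hi]; rfl
      · simp [altGo, hx, hgo]

-- ===== VERDICT (by name: the statement is the Claim_ definition above) =====
theorem get_rev_list_spec : Claim_equal_get_rev_list := by
  intro doc undo_rev _ hpre
  obtain ⟨_, _, hmem⟩ := hpre
  obtain ⟨i, hi, hgo⟩ := altGo_main undo_rev (((PySem.Dict.mk doc).get? "_revs_info").getD []) hmem
  simp only [Spec_get_rev_list, get_rev_list, get_rev_list_alt, foldl_app_eq_map, List.nil_append]
  rw [hi, hgo]
  dsimp only
  have h1 : ((i : Int) + 1) = ((i + 1 : Nat) : Int) := by push_cast; ring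
  rw [h1, PySem.List.slice_from_natCast]
  simp
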